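-- pv_equiv track=rewrite | github.com/TeikiRaihauti/SourceToSemantic | Results/Stics_soil_temperature/1/Tempprofile_code.py | layer_thickness2depth
-- ===== SOURCE A (Python) =====
-- def layer_thickness2depth(layer_thick):
--     """
--     Convert layer thicknesses to cumulative depths (bottom depth per layer).
--
--     Parameters:
--     - layer_thick: list/sequence of integers, layer thicknesses (cm)
--
--     Returns:
--     - layer_depth: list of integers, cumulative depth at bottom of each layer (cm)
--     """
--     layers_nb = len(layer_thick)
--     layer_depth = [0] * layers_nb
--     for z in range(layers_nb):
--         if layer_thick[z] != 0:
--             layer_depth[z] = sum(layer_thick[:(z + 1)])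
--         else:
--             layer_depth[z] = 0
--     return layer_depth
-- ===== SOURCE B (Python) =====
-- def layer_thickness2depth(layer_thick):
--     """One-pass running prefix sum; a layer of zero thickness reports depth 0."""
--     out = []
--     depth = 0
--     for t in layer_thick:
--         depth += t
--         out.append(depth if t != 0 else 0)
--     return out
-- ===== Notes on version B (the rewrite author's own statement) =====
-- stated objective: faster
-- what changed: Replaced the per-layer sum over a fresh slice (quadratic) with a single running prefix-sum accumulator in one pass.
import Mathlib
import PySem

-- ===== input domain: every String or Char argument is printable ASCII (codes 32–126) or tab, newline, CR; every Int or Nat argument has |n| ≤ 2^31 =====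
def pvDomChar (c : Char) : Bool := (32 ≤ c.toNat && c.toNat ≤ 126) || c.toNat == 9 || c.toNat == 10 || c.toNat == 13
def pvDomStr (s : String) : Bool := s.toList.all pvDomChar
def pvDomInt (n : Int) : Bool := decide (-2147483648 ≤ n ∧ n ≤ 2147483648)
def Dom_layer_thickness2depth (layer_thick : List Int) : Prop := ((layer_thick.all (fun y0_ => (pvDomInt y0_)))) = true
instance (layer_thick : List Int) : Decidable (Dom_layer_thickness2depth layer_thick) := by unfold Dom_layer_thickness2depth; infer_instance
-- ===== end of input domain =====

-- B replaces A's per-layer slice-and-sum (O(n^2)) with a one-pass running prefix-sum accumulator (O(n)); same values.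

-- ===== PORT A =====
-- for each index z: if layer_thick[z] != 0 then sum(layer_thick[:(z+1)]) else 0
def layer_thickness2depth (layer_thick : List Int) : List Int :=
  (List.range layer_thick.length).map (fun z =>
    if layer_thick.getD z 0 ≠ 0 then (layer_thick.take (z + 1)).sum else 0)

-- ===== PORT B =====
def ltdAltGo (depth : Int) : List Int → List Int
  | [] => []
  | t :: rest => (if t ≠ 0 then depth + t else 0) :: ltdAltGo (depth + t) rest

def layer_thickness2depth_alt (layer_thick : List Int) : List Int :=
  ltdAltGo 0 layer_thick

-- ===== PRECONDITION & SPEC =====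
def Spec_layer_thickness2depth (layer_thick : List Int) (out : List Int) : Prop := out = layer_thickness2depth_alt layer_thick
instance (layer_thick : List Int) (out : List Int) : Decidable (Spec_layer_thickness2depth layer_thick out) := by unfold Spec_layer_thickness2depth; infer_instance

-- ===== CLAIM (what is proved, stated in full; the proofs are below) =====
def Claim_equal_layer_thickness2depth : Prop := ∀ (layer_thick : List Int), Dom_layer_thickness2depth layer_thick → Spec_layer_thickness2depth layer_thick (layer_thickness2depth layer_thick)

-- ===== LEMMAS AND PROOFS =====
theorem ltdAltGo_eq (l : List Int) (acc : Int) :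
    ltdAltGo acc l =
      (List.range l.length).map (fun z =>
        if l.getD z 0 ≠ 0 then acc + (l.take (z + 1)).sum else 0) := by
  induction l generalizing acc with
  | nil => simp [ltdAltGo]
  | cons t rest ih =>
    simp only [ltdAltGo, List.length_cons, List.range_succ_eq_map, List.map_cons,
      List.map_map, ih (acc + t)]
    congr 1
    · simp
    · apply List.map_congr_left
      intro z _
      simp [List.take_succ_cons, add_assoc]

-- ===== VERDICT (by name: the statement is the Claim_ definition above) =====
theorem layer_thickness2depth_spec : Claim_equal_layer_thickness2depth := by
  intro l _
  unfold Spec_layer_thickness2depth layer_thickness2depth layer_thickness2depth_alt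
  rw [ltdAltGo_eq]
  apply List.map_congr_left
  intro z _
  simp
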